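-- pv_equiv track=rewrite | github.com/dawsons-creek/test-that | src/that/assertions.py | _create_string_diff
-- ===== SOURCE A (Python) =====
-- from typing import Any, Callable, Pattern, Type, Union, List, Dict
--
-- def _create_string_diff(expected: str, actual: str) -> List[str]:
--     """Create detailed diff for strings."""
--     lines = [f'Expected: "{expected}"', f'Got:      "{actual}"']
--
--     # Find first difference
--     for i, (e_char, a_char) in enumerate(zip(expected, actual)):
--         if e_char != a_char:
--             pointer = " " * (10 + i) + "^"  # 10 chars for "Got:      \""
--             lines.append(pointer)
--             lines.append(
--                 f"First difference at position {i}: expected '{e_char}' but got '{a_char}'"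
--             )
--             break
--     else:
--         # No differences in common part, check lengths
--         if len(expected) != len(actual):
--             if len(expected) > len(actual):
--                 lines.append(
--                     f"Expected string is longer by {len(expected) - len(actual)} characters"
--                 )
--             else:
--                 lines.append(
--                     f"Actual string is longer by {len(actual) - len(expected)} characters"
--                 )
--
--     return lines
-- ===== SOURCE B (Python) =====
-- from typing import List
--
-- def _create_string_diff(expected: str, actual: str) -> List[str]:
--     """Create detailed diff for strings via binary search on the common prefix length."""
--     lines = [f'Expected: "{expected}"', f'Got:      "{actual}"']
--     m = min(len(expected), len(actual))
--     # expected[:k] == actual[:k] is downward closed in k, so binary-search the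
--     # largest k with equal prefixes instead of scanning character by character.
--     lo, hi = 0, m
--     while lo < hi:
--         mid = (lo + hi + 1) // 2
--         if expected[:mid] == actual[:mid]:
--             lo = mid
--         else:
--             hi = mid - 1
--     p = lo
--     if p < m:
--         lines.append(" " * (10 + p) + "^")
--         lines.append(
--             f"First difference at position {p}: expected '{expected[p]}' but got '{actual[p]}'"
--         )
--     elif len(expected) != len(actual):
--         if len(expected) > len(actual):
--             lines.append(f"Expected string is longer by {len(expected) - len(actual)} characters")
--         else:
--             lines.append(f"Actual string is longer by {len(actual) - len(expected)} characters")
--     return lines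
-- ===== Notes on version B (the rewrite author's own statement) =====
-- stated objective: alternative
-- what changed: Replaces A's single interleaved for/else linear scan with a binary search for the common-prefix length (prefix equality is downward closed in k), then a separate flat formatting phase indexing the strings at that length.
import Mathlib
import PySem

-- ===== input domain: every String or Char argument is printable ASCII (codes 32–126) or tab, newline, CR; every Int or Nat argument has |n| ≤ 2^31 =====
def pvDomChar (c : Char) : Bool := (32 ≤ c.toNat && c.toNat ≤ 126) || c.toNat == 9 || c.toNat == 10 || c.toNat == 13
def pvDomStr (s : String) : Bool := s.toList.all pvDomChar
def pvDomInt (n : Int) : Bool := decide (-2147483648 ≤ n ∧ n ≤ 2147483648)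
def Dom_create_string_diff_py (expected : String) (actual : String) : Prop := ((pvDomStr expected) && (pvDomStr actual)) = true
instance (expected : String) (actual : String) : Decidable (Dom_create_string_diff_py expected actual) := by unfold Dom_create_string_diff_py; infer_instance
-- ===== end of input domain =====

-- B change (objective: alternative): A's interleaved for/else linear scan is replaced by a
-- binary search for the common-prefix length, followed by a flat formatting phase.

-- ===== PORT A =====
-- the for ... else tail: length comparison when no difference in the common part
def diffTailA (el al : Nat) : List String :=
  if el ≠ al then
    if el > al then
      ["Expected string is longer by " ++ PySem.Int.toStr ((el : Int) - (al : Int)) ++ " characters"]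
    else
      ["Actual string is longer by " ++ PySem.Int.toStr ((al : Int) - (el : Int)) ++ " characters"]
  else []

-- the for-loop over enumerate(zip(expected, actual)) with break / else
def goA (el al : Nat) : List (Char × Char) → Nat → List String
  | [], _ => diffTailA el al
  | (e, a) :: rest, i =>
    if e ≠ a then
      [String.ofList (List.replicate (10 + i) ' ') ++ "^",
       "First difference at position " ++ PySem.Int.toStr (i : Int) ++ ": expected '"
         ++ String.ofList [e] ++ "' but got '" ++ String.ofList [a] ++ "'"]
    else goA el al rest (i + 1)

def create_string_diff_py (expected : String) (actual : String) : List String :=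
  ["Expected: \"" ++ expected ++ "\"", "Got:      \"" ++ actual ++ "\""]
    ++ goA expected.toList.length actual.toList.length (expected.toList.zip actual.toList) 0

-- ===== PORT B =====
-- the while lo < hi binary-search loop of B (expected[:mid] == actual[:mid] is take)
def cplSearch (e a : List Char) (lo hi : Nat) : Nat :=
  if _h : lo < hi then
    let mid := (lo + hi + 1) / 2
    if e.take mid = a.take mid then cplSearch e a mid hi
    else cplSearch e a lo (mid - 1)
  else lo
termination_by hi - lo
decreasing_by all_goals omega

def create_string_diff_py_alt (expected : String) (actual : String) : List String :=
  let e := expected.toList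
  let a := actual.toList
  let lines := ["Expected: \"" ++ expected ++ "\"", "Got:      \"" ++ actual ++ "\""]
  let m := min e.length a.length
  let p := cplSearch e a 0 m
  if p < m then
    -- expected[p] / actual[p]: p < length on both sides, getD is exact here
    lines ++ [String.ofList (List.replicate (10 + p) ' ') ++ "^",
      "First difference at position " ++ PySem.Int.toStr (p : Int) ++ ": expected '"
        ++ String.ofList [e.getD p ' '] ++ "' but got '" ++ String.ofList [a.getD p ' '] ++ "'"]
  else if e.length ≠ a.length then
    if e.length > a.length then
      lines ++ ["Expected string is longer by " ++ PySem.Int.toStr ((e.length : Int) - (a.length : Int)) ++ " characters"]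
    else
      lines ++ ["Actual string is longer by " ++ PySem.Int.toStr ((a.length : Int) - (e.length : Int)) ++ " characters"]
  else lines

-- ===== PRECONDITION & SPEC =====
def Spec_create_string_diff_py (expected : String) (actual : String) (out : List String) : Prop := out = create_string_diff_py_alt expected actual
instance (expected : String) (actual : String) (out : List String) : Decidable (Spec_create_string_diff_py expected actual out) := by unfold Spec_create_string_diff_py; infer_instance

-- ===== CLAIM (what is proved, stated in full; the proofs are below) =====
def Claim_equal_create_string_diff_py : Prop := ∀ (expected : String) (actual : String), Dom_create_string_diff_py expected actual → Spec_create_string_diff_py expected actual (create_string_diff_py expected actual)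

-- ===== LEMMAS AND PROOFS =====

-- the common-prefix length of a zipped pair list (proof-side characterisation)
def cpl : List (Char × Char) → Nat
  | [] => 0
  | (e, a) :: rest => if e = a then cpl rest + 1 else 0

lemma cpl_le (ps : List (Char × Char)) : cpl ps ≤ ps.length := by
  induction ps with
  | nil => simp [cpl]
  | cons p rest ih => obtain ⟨e, a⟩ := p; simp only [cpl]; split <;> simp <;> omega

-- prefix equality ↔ k ≤ cpl, for k within the common length
lemma take_eq_iff (e a : List Char) (k : Nat) (hk : k ≤ min e.length a.length) :
    (e.take k = a.take k) ↔ k ≤ cpl (e.zip a) := by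
  induction e generalizing a k with
  | nil => simp at hk; simp [hk]
  | cons x xs ih =>
    cases a with
    | nil => simp at hk; simp [hk]
    | cons y ys =>
      cases k with
      | zero => simp
      | succ n =>
        simp only [List.take_succ_cons, List.cons.injEq, List.zip_cons_cons, cpl]
        by_cases hxy : x = y
        · subst hxy
          have hred : (if x = x then cpl (xs.zip ys) + 1 else 0) = cpl (xs.zip ys) + 1 := if_pos rfl
          rw [hred]
          simp only [true_and]
          rw [ih ys n (by simp at hk ⊢; omega)]
          omega
        · simp [hxy]

lemma cplSearch_eq (e a : List Char) (lo hi : Nat)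
    (h1 : lo ≤ cpl (e.zip a)) (h2 : cpl (e.zip a) ≤ hi) (h3 : hi ≤ min e.length a.length) :
    cplSearch e a lo hi = cpl (e.zip a) := by
  induction lo, hi using cplSearch.induct e a with
  | case1 lo hi hlt mid heq ih =>
    rw [cplSearch]
    simp only [hlt, dif_pos]
    rw [if_pos heq]
    apply ih
    · rw [take_eq_iff e a mid (by omega)] at heq; exact heq
    · exact h2
    · exact h3
  | case2 lo hi hlt mid hne ih =>
    rw [cplSearch]
    simp only [hlt, dif_pos]
    rw [if_neg hne]
    apply ih
    · exact h1
    · have : ¬ mid ≤ cpl (e.zip a) := by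
        intro hle
        exact hne ((take_eq_iff e a mid (by omega)).mpr hle)
      omega
    · omega
  | case3 lo hi hnlt =>
    rw [cplSearch]
    simp only [hnlt, dif_neg, not_false_eq_true]
    omega

-- A's loop produces the mismatch lines at index i + cpl ps, or the length tail
lemma goA_eq (el al : Nat) (ps : List (Char × Char)) (i : Nat) :
    goA el al ps i =
      if h : cpl ps < ps.length then
        [String.ofList (List.replicate (10 + (i + cpl ps)) ' ') ++ "^",
         "First difference at position " ++ PySem.Int.toStr ((i + cpl ps : Nat) : Int) ++ ": expected '"
           ++ String.ofList [(ps.get ⟨cpl ps, h⟩).1] ++ "' but got '"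
           ++ String.ofList [(ps.get ⟨cpl ps, h⟩).2] ++ "'"]
      else diffTailA el al := by
  induction ps generalizing i with
  | nil => simp [goA, cpl]
  | cons p rest ih =>
    obtain ⟨e, a⟩ := p
    by_cases hea : e = a
    · subst hea
      simp only [goA, ne_eq, not_true_eq_false, if_false, cpl, if_true]
      rw [ih (i + 1)]
      by_cases h : cpl rest < rest.length
      · rw [dif_pos h, dif_pos (by simp; omega)]
        have : i + 1 + cpl rest = i + (cpl rest + 1) := by omega
        rw [this]
        simp
      · rw [dif_neg h, dif_neg (by simp; omega)]
    · simp only [goA, ne_eq, hea, not_false_eq_true, if_true, cpl, if_neg hea]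
      rw [dif_pos (by simp)]
      simp

theorem create_string_diff_py_spec : Claim_equal_create_string_diff_py := by
  intro expected actual _
  unfold Spec_create_string_diff_py create_string_diff_py create_string_diff_py_alt
  set e := expected.toList
  set a := actual.toList
  have hlen : (e.zip a).length = min e.length a.length := by simp
  have hp : cplSearch e a 0 (min e.length a.length) = cpl (e.zip a) :=
    cplSearch_eq e a 0 _ (Nat.zero_le _) (hlen ▸ cpl_le _) le_rfl
  simp only [hp]
  rw [goA_eq]
  by_cases h : cpl (e.zip a) < (e.zip a).length
  · rw [dif_pos h, if_pos (by omega)]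
    have hce : cpl (e.zip a) < e.length := by omega
    have hca : cpl (e.zip a) < a.length := by omega
    have hz : (e.zip a).get ⟨cpl (e.zip a), h⟩ = (e[cpl (e.zip a)], a[cpl (e.zip a)]) := by
      simp [List.getElem_zip]
    rw [hz]
    simp [List.getD, List.getElem?_eq_getElem, hce, hca, Nat.zero_add]
  · rw [dif_neg h, if_neg (by omega)]
    unfold diffTailA
    split_ifs <;> rfl
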